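-- pv_equiv track=rewrite | github.com/ahsas257-glitc/UN | un_dashboard/views/organization.py | _default_destination_index
-- ===== SOURCE A (Python) =====
-- def _default_destination_index(options: list[str], selected_org: str) -> int:
--     if not options:
--         return 0
--     if selected_org in options:
--         return options.index(selected_org)
--     preferred_exact = f"{selected_org}-Beneficiaries"
--     if preferred_exact in options:
--         return options.index(preferred_exact)
--
--     selected_org_upper = selected_org.upper()
--     for idx, name in enumerate(options):
--         if selected_org_upper in str(name).upper():
--             return idx
--     return 0
-- ===== SOURCE B (Python) =====
-- def _default_destination_index(options: list[str], selected_org: str) -> int: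
--     preferred = f"{selected_org}-Beneficiaries"
--     needle = selected_org.upper()
--     first_exact = None
--     first_preferred = None
--     first_substring = None
--     for idx, name in enumerate(options):
--         if first_exact is None and name == selected_org:
--             first_exact = idx
--         if first_preferred is None and name == preferred:
--             first_preferred = idx
--         if first_substring is None and needle in str(name).upper():
--             first_substring = idx
--     if first_exact is not None:
--         return first_exact
--     if first_preferred is not None:
--         return first_preferred
--     if first_substring is not None:
--         return first_substring
--     return 0
-- ===== Notes on version B (the rewrite author's own statement) =====
-- stated objective: alternative
-- what changed: Replaces A's sequential membership tests plus list.index re-scans and a separate substring loop with a single enumerate pass that records the first index of each priority tier (exact, '-Beneficiaries', case-insensitive substring) and resolves tier priority after the loop.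
import Mathlib
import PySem

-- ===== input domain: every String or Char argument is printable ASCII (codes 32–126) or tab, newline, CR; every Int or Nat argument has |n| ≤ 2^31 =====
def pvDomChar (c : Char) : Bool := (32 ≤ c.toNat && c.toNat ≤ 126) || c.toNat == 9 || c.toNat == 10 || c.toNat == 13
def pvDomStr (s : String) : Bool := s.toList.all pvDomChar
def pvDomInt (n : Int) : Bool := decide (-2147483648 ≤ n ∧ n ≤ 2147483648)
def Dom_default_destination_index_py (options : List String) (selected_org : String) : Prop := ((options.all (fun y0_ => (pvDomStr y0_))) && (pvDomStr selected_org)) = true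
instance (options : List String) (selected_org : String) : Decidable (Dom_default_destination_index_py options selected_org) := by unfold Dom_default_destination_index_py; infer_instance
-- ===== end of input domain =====

-- B replaces A's separate membership/index scans and substring loop by ONE pass that
-- records the first index of each priority tier (exact / preferred / substring); objective: alternative decomposition.

-- ===== PORT A =====
-- the final 'for idx, name in enumerate(options): if … return idx' loop of A
def ddiLoopA (su : String) : List String → Int → Int
  | [], _ => 0
  | x :: rest, i => if PySem.Str.isIn su (PySem.Str.upper x) then i else ddiLoopA su rest (i + 1)

def default_destination_index_py (options : List String) (selected_org : String) : Int :=
  if options = [] then 0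
  else if options.contains selected_org then
    (((PySem.List.index? options selected_org).getD 0 : Nat) : Int)
  else
    if options.contains (selected_org ++ "-Beneficiaries") then
      (((PySem.List.index? options (selected_org ++ "-Beneficiaries")).getD 0 : Nat) : Int)
    else
      ddiLoopA (PySem.Str.upper selected_org) options 0

-- ===== PORT B =====
-- one iteration of B's loop body: set each still-None tier index
def ddiStep (sel pref su : String) (acc : Option Nat × Option Nat × Option Nat)
    (i : Nat) (name : String) : Option Nat × Option Nat × Option Nat :=
  (if acc.1.isNone && (name == sel) then some i else acc.1,
   if acc.2.1.isNone && (name == pref) then some i else acc.2.1,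
   if acc.2.2.isNone && PySem.Str.isIn su (PySem.Str.upper name) then some i else acc.2.2)

-- B's 'for idx, name in enumerate(options)' loop
def ddiLoopB (sel pref su : String) : List String → Nat →
    Option Nat × Option Nat × Option Nat → Option Nat × Option Nat × Option Nat
  | [], _, acc => acc
  | x :: rest, i, acc => ddiLoopB sel pref su rest (i + 1) (ddiStep sel pref su acc i x)

def default_destination_index_py_alt (options : List String) (selected_org : String) : Int :=
  match (ddiLoopB selected_org (selected_org ++ "-Beneficiaries") (PySem.Str.upper selected_org)
      options 0 (none, none, none)) with
  | (some k, _, _) => (k : Int)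
  | (none, some k, _) => (k : Int)
  | (none, none, some k) => (k : Int)
  | (none, none, none) => 0

-- ===== PRECONDITION & SPEC =====
def Spec_default_destination_index_py (options : List String) (selected_org : String) (out : Int) : Prop := out = default_destination_index_py_alt options selected_org
instance (options : List String) (selected_org : String) (out : Int) : Decidable (Spec_default_destination_index_py options selected_org out) := by unfold Spec_default_destination_index_py; infer_instance

-- ===== CLAIM (what is proved, stated in full; the proofs are below) =====
def Claim_equal_default_destination_index_py : Prop := ∀ (options : List String) (selected_org : String), Dom_default_destination_index_py options selected_org → Spec_default_destination_index_py options selected_org (default_destination_index_py options selected_org)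

-- ===== LEMMAS AND PROOFS =====

-- one step of B's loop, per component
theorem ddiStepOr (o : Option Nat) (c : Bool) (f : Option Nat) (n : Nat) :
    (if o.isNone && c then some n else o).or (f.map (· + (n + 1))) =
      o.or ((if c then some 0 else f.map (· + 1)).map (· + n)) := by
  cases o with
  | some a => simp
  | none =>
    cases c with
    | true => simp
    | false =>
      simp
      congr 1
      funext a
      omega

-- B's loop computes, per tier, the first matching index (offset by the start counter),
-- unless that tier was already set.
theorem ddiLoopB_spec (sel pref su : String) (xs : List String) (n : Nat)
    (e p s : Option Nat) :
    ddiLoopB sel pref su xs n (e, p, s) =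
      (e.or ((List.findIdx? (fun x => x == sel) xs).map (· + n)),
       p.or ((List.findIdx? (fun x => x == pref) xs).map (· + n)),
       s.or ((List.findIdx? (fun x => PySem.Str.isIn su (PySem.Str.upper x)) xs).map (· + n))) := by
  induction xs generalizing n e p s with
  | nil => simp [ddiLoopB]
  | cons x rest ih =>
    rw [ddiLoopB, ih]
    simp only [ddiStep, List.findIdx?_cons]
    exact Prod.ext (ddiStepOr _ _ _ _) (Prod.ext (ddiStepOr _ _ _ _) (ddiStepOr _ _ _ _))

-- A's substring loop returns the first matching index (offset by the counter), else 0.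
theorem ddiLoopA_spec (su : String) (xs : List String) (n : Nat) :
    ddiLoopA su xs (n : Int) =
      match List.findIdx? (fun x => PySem.Str.isIn su (PySem.Str.upper x)) xs with
      | some k => ((k + n : Nat) : Int)
      | none => 0 := by
  induction xs generalizing n with
  | nil => simp [ddiLoopA]
  | cons x rest ih =>
    rw [ddiLoopA, List.findIdx?_cons]
    have hcast : ((n : Int) + 1) = ((n + 1 : Nat) : Int) := by push_cast; ring
    rw [hcast, ih (n + 1)]
    by_cases h : PySem.Chars.isIn su.toList (PySem.Chars.upper x.toList) = true
    · simp [h]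
    · simp only [PySem.Str.isIn_eq, PySem.Str.toList_upper, h, Bool.false_eq_true, if_false]
      cases List.findIdx? (fun x => PySem.Chars.isIn su.toList (PySem.Chars.upper x.toList)) rest with
      | none => simp
      | some k =>
        simp
        ring

theorem idxOf?_eq_findIdx? (v : String) (xs : List String) :
    List.idxOf? v xs = List.findIdx? (fun x => x == v) xs := by
  induction xs with
  | nil => rfl
  | cons x rest ih => rw [List.idxOf?_cons, List.findIdx?_cons, ih]

theorem contains_iff_findIdx?_isSome (v : String) (xs : List String) :
    xs.contains v = true ↔ (List.findIdx? (fun x => x == v) xs).isSome = true := by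
  rw [← idxOf?_eq_findIdx?]
  simp [List.isSome_idxOf?]

-- ===== VERDICT (by name: the statement is the Claim_ definition above) =====
theorem default_destination_index_py_spec : Claim_equal_default_destination_index_py := by
  intro options selected_org _
  unfold Spec_default_destination_index_py
  unfold default_destination_index_py default_destination_index_py_alt
  rw [ddiLoopB_spec]
  simp only [Option.none_or]
  by_cases hnil : options = []
  · subst hnil; simp
  · rw [if_neg hnil]
    by_cases h1 : options.contains selected_org = true
    · rw [if_pos h1]
      rcases Option.isSome_iff_exists.mp ((contains_iff_findIdx?_isSome _ _).mp h1) with ⟨k, hk⟩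
      rw [PySem.List.index?_eq_idxOf?, idxOf?_eq_findIdx?, hk]
      simp
    · rw [if_neg h1]
      have h1' : List.findIdx? (fun x => x == selected_org) options = none := by
        cases hf : List.findIdx? (fun x => x == selected_org) options with
        | none => rfl
        | some k => exact absurd ((contains_iff_findIdx?_isSome _ _).mpr (by simp [hf])) h1
      by_cases h2 : options.contains (selected_org ++ "-Beneficiaries") = true
      · rw [if_pos h2]
        rcases Option.isSome_iff_exists.mp ((contains_iff_findIdx?_isSome _ _).mp h2) with ⟨k, hk⟩
        rw [PySem.List.index?_eq_idxOf?, idxOf?_eq_findIdx?, hk]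
        simp [h1']
      · rw [if_neg h2]
        have h2' : List.findIdx? (fun x => x == selected_org ++ "-Beneficiaries") options = none := by
          cases hf : List.findIdx? (fun x => x == selected_org ++ "-Beneficiaries") options with
          | none => rfl
          | some k => exact absurd ((contains_iff_findIdx?_isSome _ _).mpr (by simp [hf])) h2
        have hA := ddiLoopA_spec (PySem.Str.upper selected_org) options 0
        simp only [Nat.cast_zero] at hA
        rw [hA]
        cases List.findIdx? (fun x => PySem.Str.isIn (PySem.Str.upper selected_org) (PySem.Str.upper x)) options with
        | none => simp [h1', h2']
        | some k => simp [h1', h2']
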